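-- pv_equiv track=rewrite | github.com/JHill6253/Drake_University_Course_Work | Analysis-of-vertex-cover-algorithms/reductions.py | independent_set
-- ===== SOURCE A (Python) =====
-- from itertools import combinations
--
-- def maximum_clique(G, k):
--     """Checks if the graph G contains a clique of size >= k
--
--     Parameters:
--         G, a undirected graph (adjacency matrix)
--         k, a non-negative integer
--     Returns:
--         True   if G has a clique of size >= k
--         False  otherwise"""
--     # For each subset of vertices with size k...
--     for C in combinations(range(len(G)), k):
--         # If every pair of vertices, (u,v), has an edge...
--         if all(G[u][v] == 1 for u, v in combinations(C, 2)):
--             return True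
--     # If we get here, no k-subset is a clique
--     return False
--
-- def independent_set(g, k):
--     """Checks if the graph G contains an independent set of size >= k
--
--     Parameters:
--         G, a undirected graph (adjacency matrix)
--         k, a non-negative integer
--
--     Returns:
--         True   if G has an independent set of size >= k
--         False  otherwise"""
--     for kVerts in combinations(range(len(g)), k):
--         tmp = [[0] * len(g[i]) for i in range(len(g))]
--         for u, v in combinations(kVerts, 2):
--             if g[u][v]:
--                 tmp[u][v] = 1
--                 tmp[v][u] = 1
--         if not maximum_clique(tmp, 2):
--             return True
--     return False
-- ===== SOURCE B (Python) =====
-- def independent_set(g, k):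
--     """Checks if g (adjacency matrix) contains an independent set of size >= k,
--     by backtracking: extend a partial independent set with compatible vertices only."""
--     n = len(g)
--     if k > n:
--         return False
--     chosen = []
--
--     def extend(start, need):
--         if need == 0:
--             return True
--         for v in range(start, n):
--             if all(g[u][v] == 0 for u in chosen):
--                 chosen.append(v)
--                 if extend(v + 1, need - 1):
--                     return True
--                 chosen.pop()
--         return False
--
--     return extend(0, k)
-- ===== Notes on version B (the rewrite author's own statement) =====
-- stated objective: alternative
-- what changed: A enumerates every k-subset, materialises an n-by-n scratch adjacency matrix of the subset's internal edges and calls maximum_clique(tmp,2) to scan all O(n^2) vertex pairs; B does a pruned backtracking search that extends a partial independent set only with vertices compatible with everything chosen so far, never building any matrix.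
-- outside the precondition, e.g. on independent_set([[0, 9, 0], [0, 0, 0], [0, 0, 0, 0, 0]], 2): A returns True, B returns True; on independent_set([[0, 1], [1, 0, 5]], 1): A returns True, B returns True
import Mathlib
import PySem

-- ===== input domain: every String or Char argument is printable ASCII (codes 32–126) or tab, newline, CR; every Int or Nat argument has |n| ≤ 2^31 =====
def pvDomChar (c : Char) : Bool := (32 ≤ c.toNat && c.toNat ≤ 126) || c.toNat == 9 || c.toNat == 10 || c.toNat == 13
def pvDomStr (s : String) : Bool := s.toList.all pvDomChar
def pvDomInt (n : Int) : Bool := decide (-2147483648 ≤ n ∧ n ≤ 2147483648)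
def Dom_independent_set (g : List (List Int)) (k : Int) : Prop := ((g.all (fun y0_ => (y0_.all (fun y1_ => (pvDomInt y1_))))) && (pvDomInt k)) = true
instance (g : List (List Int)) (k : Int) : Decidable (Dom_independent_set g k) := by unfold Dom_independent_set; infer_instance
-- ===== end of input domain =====

-- B replaces A's "enumerate every k-subset, build a scratch matrix and search it for a 2-clique"
-- with a pruned backtracking search that only extends partial independent sets (objective: alternative).
-- Return values only; neither version mutates its arguments.

-- ===== PORT A =====
-- g[u][v] (indices nonnegative and in range on every input Pre_ admits)
def pvAt (g : List (List Int)) (u v : Int) : Int :=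
  PySem.List.pyGetD (PySem.List.pyGetD g u []) v 0

def maximum_clique (G : List (List Int)) (k : Int) : Bool :=
  (PySem.List.combinations (PySem.List.pyRange 0 (G.length : Int)) k.toNat).any
    (fun C =>
      (PySem.List.combinations C 2).all (fun p =>
        match p with
        | [u, v] => pvAt G u v == 1
        | _ => true))

-- tmp[u][v] = 1; tmp[v][u] = 1  (guarded by 'if g[u][v]:')
def pvSet2 (t : List (List Int)) (u v : Int) (x : Int) : List (List Int) :=
  PySem.List.pySetD t u (PySem.List.pySetD (PySem.List.pyGetD t u []) v x)

def pvTmpStep (g : List (List Int)) (t : List (List Int)) (p : List Int) : List (List Int) :=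
  match p with
  | [u, v] => if pvAt g u v ≠ 0 then pvSet2 (pvSet2 t u v 1) v u 1 else t
  | _ => t

def pvTmp (g : List (List Int)) (kVerts : List Int) : List (List Int) :=
  (PySem.List.combinations kVerts 2).foldl (pvTmpStep g)
    ((PySem.List.pyRange 0 (g.length : Int)).map
      (fun i => List.replicate (PySem.List.pyGetD g i []).length (0 : Int)))

def independent_set (g : List (List Int)) (k : Int) : Bool :=
  (PySem.List.combinations (PySem.List.pyRange 0 (g.length : Int)) k.toNat).any
    (fun kVerts => !(maximum_clique (pvTmp g kVerts) 2))

-- ===== PORT B =====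
-- extend(start, need) of Source B; 'chosen' is passed functionally (append ↔ backtracking pop)
def altExtend (g : List (List Int)) (n : Nat) (chosen : List Int) (start : Nat) (need : Int) : Bool :=
  if need = 0 then true
  else if h : start < n then
    (if (chosen.all (fun u => pvAt g u (start : Int) == 0)) &&
        altExtend g n (chosen ++ [(start : Int)]) (start + 1) (need - 1) then true
     else altExtend g n chosen (start + 1) need)
  else false
termination_by n - start
decreasing_by all_goals omega

def independent_set_alt (g : List (List Int)) (k : Int) : Bool :=
  if (g.length : Int) < k then false
  else altExtend g g.length [] 0 k

-- ===== PRECONDITION & SPEC =====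
-- Pre_ excludes negative k (A raises ValueError) and, when k ≤ len(g), non-square matrices:
-- there A indexes g and its scratch matrix across rows and raises IndexError on almost all such
-- inputs; the few that still return do so only by accidental short-circuit order.
def Pre_independent_set (g : List (List Int)) (k : Int) : Prop :=
  0 ≤ k ∧ (k ≤ (g.length : Int) → ∀ row ∈ g, row.length = g.length)
instance (g : List (List Int)) (k : Int) : Decidable (Pre_independent_set g k) := by
  unfold Pre_independent_set; infer_instance

def pvWitness_independent_set : List (List Int) × Int := ([[0, 1], [1, 0]], 2)

def Spec_independent_set (g : List (List Int)) (k : Int) (out : Bool) : Prop := out = independent_set_alt g k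
instance (g : List (List Int)) (k : Int) (out : Bool) : Decidable (Spec_independent_set g k out) := by unfold Spec_independent_set; infer_instance

-- ===== CLAIM (what is proved, stated in full; the proofs are below) =====
def Claim_equal_independent_set : Prop := ∀ (g : List (List Int)) (k : Int), Dom_independent_set g k → Pre_independent_set g k → Spec_independent_set g k (independent_set g k)

-- ===== LEMMAS AND PROOFS =====

-- entry (u,v) of g, Nat indices (proof-side view of pvAt/pvAt)
def gEnt (g : List (List Int)) (u v : Nat) : Int := (g.getD u []).getD v 0

-- shape of a matrix the tmp fold works on
def SqShape (t : List (List Int)) (n : Nat) : Prop :=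
  t.length = n ∧ ∀ i, i < n → (t.getD i []).length = n

theorem pvAt_natCast (g : List (List Int)) (u v : Nat) : pvAt g (u : Int) (v : Int) = gEnt g u v := by
  simp [pvAt, gEnt, PySem.List.pyGetD_natCast]

theorem pair_sublist_range {a b n : Nat} (hab : a < b) (hb : b < n) :
    [a, b].Sublist (List.range n) := by
  have h1 : n = b + (n - b) := by omega
  rw [h1, List.range_add]
  have h2 : n - b = (n - b - 1) + 1 := by omega
  rw [h2, List.range_succ_eq_map]
  exact List.Sublist.append (l₁ := [a]) (r₁ := [b])
    (List.singleton_sublist.2 (List.mem_range.2 hab))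
    (List.singleton_sublist.2 (by simp))

theorem pvTmpStep_length (g : List (List Int)) (t : List (List Int)) (p : List Int) :
    (pvTmpStep g t p).length = t.length := by
  match p with
  | [] => rfl
  | [u] => rfl
  | [u, v] =>
    simp only [pvTmpStep, pvSet2]
    split <;> simp [PySem.List.length_pySetD]
  | u :: v :: w :: r => rfl

theorem foldl_pvTmpStep_length (g : List (List Int)) :
    ∀ (P : List (List Int)) (t : List (List Int)),
      (P.foldl (pvTmpStep g) t).length = t.length := by
  intro P
  induction P with
  | nil => intro t; rfl
  | cons q P ih => intro t; rw [List.foldl_cons, ih, pvTmpStep_length]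

theorem pvTmp_length (g : List (List Int)) (kVerts : List Int) :
    (pvTmp g kVerts).length = g.length := by
  unfold pvTmp
  rw [foldl_pvTmpStep_length, PySem.List.pyRange_zero_natCast]
  simp

-- row a of the double update
theorem set2_row (t : List (List Int)) (u v : Nat) (x : Int) (a : Nat) (hu : u < t.length) :
    (pvSet2 t (u : Int) (v : Int) x).getD a []
      = if a = u then (t.getD u []).set v x else t.getD a [] := by
  simp only [pvSet2, PySem.List.pySetD_natCast, PySem.List.pyGetD_natCast]
  rw [List.getD_eq_getElem?_getD (l := t.set u ((t.getD u []).set v x)) (i := a),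
    List.getElem?_set]
  by_cases hau : u = a
  · subst hau; simp [hu]
  · rw [if_neg hau, if_neg (fun h : a = u => hau h.symm), ← List.getD_eq_getElem?_getD]

-- entry of the double update, in range
theorem gEnt_set2 (t : List (List Int)) (u v : Nat) (x : Int) (a b : Nat)
    (hu : u < t.length) (hv : v < (t.getD u []).length) :
    gEnt (pvSet2 t (u : Int) (v : Int) x) a b
      = if a = u ∧ b = v then x else gEnt t a b := by
  simp only [gEnt]
  rw [set2_row t u v x a hu]
  by_cases hau : a = u
  · subst hau
    simp only [true_and, if_true]
    rw [List.getD_eq_getElem?_getD (l := (t.getD a []).set v x) (i := b), List.getElem?_set]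
    by_cases hbv : v = b
    · subst hbv
      have hv' : v < (t[a]?.getD ([]:List Int)).length := by
        rw [← List.getD_eq_getElem?_getD]; exact hv
      simp [hv']
    · rw [if_neg hbv, if_neg (fun h : b = v => hbv h.symm), ← List.getD_eq_getElem?_getD]
  · rw [if_neg hau, if_neg (by tauto)]

theorem SqShape_set2 {t : List (List Int)} {n : Nat} (h : SqShape t n) (u v : Nat) (x : Int)
    (hu : u < t.length) :
    SqShape (pvSet2 t (u : Int) (v : Int) x) n := by
  obtain ⟨hl, hr⟩ := h
  refine ⟨by simp [pvSet2, hl], ?_⟩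
  intro i hi
  rw [set2_row t u v x i hu]
  by_cases hiu : i = u
  · subst hiu
    rw [if_pos rfl, List.length_set]
    exact hr i hi
  · rw [if_neg hiu]
    exact hr i hi

theorem getD_zero_of_all_zero (r : List Int) (b : Nat) (h : ∀ y ∈ r, y = 0) : r.getD b 0 = 0 := by
  rw [List.getD_eq_getElem?_getD]
  rcases hb : r[b]? with _ | y
  · rfl
  · simpa using h y (List.mem_of_getElem? hb)

-- the zero scratch matrix A starts from
theorem gEnt_init (g : List (List Int)) (a b : Nat) :
    gEnt ((PySem.List.pyRange 0 (g.length : Int)).map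
      (fun i => List.replicate (PySem.List.pyGetD g i []).length (0 : Int))) a b = 0 := by
  rw [PySem.List.pyRange_zero_natCast, List.map_map]
  simp only [gEnt]
  by_cases ha : a < g.length
  · rw [List.getD_eq_getElem
      (l := List.map ((fun i => List.replicate (PySem.List.pyGetD g i []).length (0 : Int)) ∘
        (fun k : Nat => (k : Int))) (List.range g.length)) (d := ([] : List Int))
      (hn := by simpa using ha), List.getElem_map]
    exact getD_zero_of_all_zero _ b (fun y hy => List.eq_of_mem_replicate hy)
  · rw [List.getD_eq_default
      (l := List.map ((fun i => List.replicate (PySem.List.pyGetD g i []).length (0 : Int)) ∘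
        (fun k : Nat => (k : Int))) (List.range g.length)) ([] : List Int)
      (by simpa using ha)]
    rfl

theorem SqShape_init (g : List (List Int)) (n : Nat) (hn : g.length = n)
    (sq : ∀ row ∈ g, row.length = n) :
    SqShape ((PySem.List.pyRange 0 (g.length : Int)).map
      (fun i => List.replicate (PySem.List.pyGetD g i []).length (0 : Int))) n := by
  rw [PySem.List.pyRange_zero_natCast, List.map_map]
  constructor
  · simp [hn]
  · intro i hi
    have hig : i < g.length := by omega
    rw [List.getD_eq_getElem
      (l := List.map ((fun i => List.replicate (PySem.List.pyGetD g i []).length (0 : Int)) ∘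
        (fun k : Nat => (k : Int))) (List.range g.length)) (d := ([] : List Int))
      (hn := by simpa using hig), List.getElem_map]
    simp only [Function.comp, PySem.List.pyGetD_natCast, List.length_replicate,
      List.getElem_range]
    rw [List.getD_eq_getElem (hn := hig)]
    exact sq _ (List.getElem_mem hig)

-- does the pair q touch cell (a,b) with an edge of g?
def pairHits (g : List (List Int)) (a b : Nat) (q : List Nat) : Bool :=
  match q with
  | [u, v] => decide (((u = a ∧ v = b) ∨ (u = b ∧ v = a)) ∧ gEnt g u v ≠ 0)
  | _ => false

theorem foldl_entry (g : List (List Int)) (n : Nat) (a b : Nat) :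
    ∀ (P : List (List Nat)) (t : List (List Int)), SqShape t n →
      (∀ q ∈ P, ∃ u v, q = [u, v] ∧ u < n ∧ v < n) →
      gEnt (P.foldl (fun t' q => pvTmpStep g t' (List.map (fun z : Nat => (z : Int)) q)) t) a b
        = if P.any (pairHits g a b) then 1 else gEnt t a b := by
  intro P
  induction P with
  | nil => intro t _ _; simp
  | cons q P ih =>
    intro t ht hq
    obtain ⟨u, v, rfl, hu, hv⟩ := hq _ (List.mem_cons_self ..)
    have hq' := fun r hr => hq r (List.mem_cons_of_mem _ hr)
    rw [List.foldl_cons]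
    have hstep : pvTmpStep g t (List.map (fun z : Nat => (z : Int)) [u, v]) =
        if gEnt g u v ≠ 0 then pvSet2 (pvSet2 t (u : Int) (v : Int) 1) (v : Int) (u : Int) 1
        else t := by
      simp [pvTmpStep, pvAt_natCast]
    rw [hstep]
    by_cases he : gEnt g u v ≠ 0
    · rw [if_pos he]
      have hu' : u < t.length := by rw [ht.1]; exact hu
      have hv' : v < (t.getD u []).length := by rw [ht.2 u hu]; exact hv
      have ht1 : SqShape (pvSet2 t (u : Int) (v : Int) 1) n := SqShape_set2 ht u v 1 hu'
      have hv'' : v < (pvSet2 t (u : Int) (v : Int) 1).length := by rw [ht1.1]; exact hv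
      have hu'' : u < ((pvSet2 t (u : Int) (v : Int) 1).getD v []).length := by
        rw [ht1.2 v hv]; exact hu
      have ht2 : SqShape (pvSet2 (pvSet2 t (u : Int) (v : Int) 1) (v : Int) (u : Int) 1) n :=
        SqShape_set2 ht1 v u 1 hv''
      rw [ih _ ht2 hq']
      by_cases hP : P.any (pairHits g a b) = true
      · simp [List.any_cons, hP]
      · have hany : (([u, v] :: P).any (pairHits g a b)) = pairHits g a b [u, v] := by
          simp [List.any_cons, hP]
        rw [hany, gEnt_set2 _ v u 1 a b hv'' hu'', gEnt_set2 t u v 1 a b hu' hv']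
        simp only [pairHits, he, ne_eq, not_false_iff, and_true, decide_eq_true_eq]
        split_ifs <;> first | rfl | omega
    · rw [if_neg he]
      rw [ne_eq, not_not] at he
      rw [ih t ht hq']
      have hqf : pairHits g a b [u, v] = false := by simp [pairHits, he]
      simp [List.any_cons, hqf]

theorem eq_pair_of_length_two {α : Type} {l : List α} (h : l.length = 2) :
    ∃ a b, l = [a, b] := by
  match l with
  | [a, b] => exact ⟨a, b, rfl⟩
  | [] => simp at h
  | [a] => simp at h
  | a :: b :: c :: r => simp at h

theorem sqshape_of_rows (g : List (List Int)) (n : Nat) (hn : g.length = n)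
    (sq : ∀ row ∈ g, row.length = n) : SqShape g n := by
  refine ⟨hn, fun i hi => ?_⟩
  rw [List.getD_eq_getElem (hn := by omega)]
  exact sq _ (List.getElem_mem (by omega))

theorem tmp_entry (g : List (List Int)) (n : Nat) (hsq : SqShape g n)
    (hrows : ∀ row ∈ g, row.length = n) (CN : List Nat)
    (hC : CN.Sublist (List.range n)) (a b : Nat) (hab : a < b) (hb : b < n) :
    gEnt (pvTmp g (List.map (fun z : Nat => (z : Int)) CN)) a b
      = if [a, b].Sublist CN ∧ gEnt g a b ≠ 0 then 1 else 0 := by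
  unfold pvTmp
  rw [PySem.List.combinations_map, List.foldl_map]
  have hmem : ∀ q ∈ PySem.List.combinations CN 2, ∃ u v, q = [u, v] ∧ u < n ∧ v < n := by
    intro q hq
    obtain ⟨hsub, hlen⟩ := (PySem.List.mem_combinations_iff _ _ _).1 hq
    obtain ⟨u, v, rfl⟩ := eq_pair_of_length_two hlen
    have hu : u < n := List.mem_range.1 (hC.subset (hsub.subset (by simp)))
    have hv : v < n := List.mem_range.1 (hC.subset (hsub.subset (by simp)))
    exact ⟨u, v, rfl, hu, hv⟩
  rw [foldl_entry g n a b _ _ (SqShape_init g n hsq.1 hrows) hmem, gEnt_init]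
  have hCp : CN.Pairwise (· < ·) := List.Pairwise.sublist hC List.pairwise_lt_range
  have hcond : (PySem.List.combinations CN 2).any (pairHits g a b) = true ↔
      ([a, b].Sublist CN ∧ gEnt g a b ≠ 0) := by
    rw [List.any_eq_true]
    constructor
    · rintro ⟨q, hqmem, hq⟩
      obtain ⟨hsub, hlen⟩ := (PySem.List.mem_combinations_iff _ _ _).1 hqmem
      obtain ⟨u, v, rfl⟩ := eq_pair_of_length_two hlen
      simp only [pairHits, decide_eq_true_eq] at hq
      obtain ⟨hmatch, he⟩ := hq
      have huv : u < v := List.pairwise_iff_forall_sublist.1 hCp hsub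
      rcases hmatch with ⟨rfl, rfl⟩ | ⟨rfl, rfl⟩
      · exact ⟨hsub, he⟩
      · omega
    · rintro ⟨hsub, he⟩
      refine ⟨[a, b], (PySem.List.mem_combinations_iff _ _ _).2 ⟨hsub, rfl⟩, ?_⟩
      simp only [pairHits, decide_eq_true_eq]
      exact ⟨Or.inl ⟨trivial, trivial⟩, he⟩
  by_cases hc : [a, b].Sublist CN ∧ gEnt g a b ≠ 0
  · rw [if_pos (hcond.2 hc), if_pos hc]
  · rw [if_neg (fun h => hc (hcond.1 h)), if_neg hc]

theorem maximum_clique_char (T : List (List Int)) :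
    (maximum_clique T 2 = true ↔
      ∃ a b : Nat, a < b ∧ b < T.length ∧ gEnt T a b = 1) := by
  unfold maximum_clique
  rw [PySem.List.pyRange_zero_natCast, show (2 : Int).toNat = 2 from rfl,
    PySem.List.combinations_map, List.any_map, List.any_eq_true]
  constructor
  · rintro ⟨c, hc, hall⟩
    obtain ⟨hsub, hlen⟩ := (PySem.List.mem_combinations_iff _ _ _).1 hc
    obtain ⟨a, b, rfl⟩ := eq_pair_of_length_two hlen
    have hab : a < b := List.pairwise_iff_forall_sublist.1 List.pairwise_lt_range hsub
    have hbT : b < T.length := List.mem_range.1 (hsub.subset (by simp))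
    refine ⟨a, b, hab, hbT, ?_⟩
    simp only [Function.comp_apply] at hall
    have hcomb : PySem.List.combinations (List.map (fun k : Nat => (k : Int)) [a, b]) 2
        = [[(a : Int), (b : Int)]] := by
      simpa using PySem.List.combinations_length_self (xs := [(a : Int), (b : Int)])
    rw [hcomb] at hall
    simp only [List.all_cons, List.all_nil, Bool.and_true] at hall
    simpa [pvAt_natCast] using hall
  · rintro ⟨a, b, hab, hb, hT⟩
    refine ⟨[a, b], (PySem.List.mem_combinations_iff _ _ _).2 ⟨pair_sublist_range hab hb, rfl⟩, ?_⟩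
    simp only [Function.comp_apply]
    have hcomb : PySem.List.combinations (List.map (fun k : Nat => (k : Int)) [a, b]) 2
        = [[(a : Int), (b : Int)]] := by
      simpa using PySem.List.combinations_length_self (xs := [(a : Int), (b : Int)])
    rw [hcomb]
    simp [pvAt_natCast, hT]

theorem altExtend_iff (g : List (List Int)) (n : Nat) :
    ∀ (m start : Nat) (chosen : List Int) (need : Int), n - start = m → 0 ≤ need →
    (altExtend g n chosen start need = true ↔
      ∃ C : List Nat, C.Sublist (List.range' start (n - start)) ∧ (C.length : Int) = need ∧
        (∀ u ∈ chosen, ∀ v ∈ C, pvAt g u (v : Int) = 0) ∧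
        C.Pairwise (fun u v => gEnt g u v = 0)) := by
  intro m
  induction m using Nat.strong_induction_on with
  | _ m IH =>
    intro start chosen need hm hneed
    rw [altExtend]
    by_cases h0 : need = 0
    · subst h0
      rw [if_pos rfl]
      constructor
      · intro _
        exact ⟨[], List.nil_sublist _, by simp, by simp, List.Pairwise.nil⟩
      · intro _; rfl
    · rw [if_neg h0]
      by_cases hlt : start < n
      · rw [dif_pos hlt]
        have hm1 : n - (start + 1) < m := by omega
        have hneed1 : (0 : Int) ≤ need - 1 := by omega
        have IH1 := IH _ hm1 (start + 1) (chosen ++ [(start : Int)]) (need - 1) rfl hneed1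
        have IH2 := IH _ hm1 (start + 1) chosen need rfl hneed
        have hrange : List.range' start (n - start)
            = start :: List.range' (start + 1) (n - (start + 1)) := by
          have h : n - start = (n - (start + 1)) + 1 := by clear IH1 IH2; omega
          rw [h, List.range'_succ]
        constructor
        · intro hres
          by_cases hc : (chosen.all (fun u => pvAt g u (start : Int) == 0) &&
              altExtend g n (chosen ++ [(start : Int)]) (start + 1) (need - 1)) = true
          · rw [Bool.and_eq_true] at hc
            obtain ⟨hall, hrec⟩ := hc
            obtain ⟨C', hC'sub, hC'len, hC'comp, hC'pair⟩ := IH1.1 hrec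
            refine ⟨start :: C', ?_, ?_, ?_, ?_⟩
            · rw [hrange]; exact List.cons_sublist_cons.2 hC'sub
            · simp only [List.length_cons]; push_cast at hC'len ⊢; omega
            · intro u hu v hv
              rcases List.mem_cons.1 hv with rfl | hv'
              · simpa using List.all_eq_true.1 hall u hu
              · exact hC'comp u (List.mem_append_left _ hu) v hv'
            · refine List.Pairwise.cons ?_ hC'pair
              intro v hv
              have h := hC'comp (start : Int) (List.mem_append_right _ (by simp)) v hv
              rwa [pvAt_natCast] at h
          · rw [if_neg hc] at hres
            obtain ⟨C, hsub, hlen, hcomp, hpair⟩ := IH2.1 hres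
            exact ⟨C, by rw [hrange]; exact hsub.cons _, hlen, hcomp, hpair⟩
        · rintro ⟨C, hsub, hlen, hcomp, hpair⟩
          rw [hrange] at hsub
          rcases List.sublist_cons_iff.1 hsub with hsub' | ⟨C', rfl, hC'⟩
          · have h2 : altExtend g n chosen (start + 1) need = true :=
              IH2.2 ⟨C, hsub', hlen, hcomp, hpair⟩
            split
            · rfl
            · exact h2
          · have hall : chosen.all (fun u => pvAt g u (start : Int) == 0) = true := by
              rw [List.all_eq_true]
              intro u hu
              simpa using hcomp u hu start (by simp)
            have hrec : altExtend g n (chosen ++ [(start : Int)]) (start + 1) (need - 1) = true := by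
              apply IH1.2
              refine ⟨C', hC', ?_, ?_, (List.pairwise_cons.1 hpair).2⟩
              · simp only [List.length_cons] at hlen; push_cast at hlen ⊢; omega
              · intro u hu v hv
                rcases List.mem_append.1 hu with hu' | hu'
                · exact hcomp u hu' v (List.mem_cons_of_mem _ hv)
                · have hus : u = (start : Int) := by simpa using hu'
                  subst hus
                  rw [pvAt_natCast]
                  exact (List.pairwise_cons.1 hpair).1 v hv
            rw [if_pos (by rw [hall, hrec]; rfl)]
      · rw [dif_neg hlt]
        constructor
        · intro h; exact absurd h (by simp)
        · rintro ⟨C, hsub, hlen, _, _⟩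
          have hz : n - start = 0 := by omega
          rw [hz, List.range'_zero] at hsub
          have hC : C = [] := List.sublist_nil.1 hsub
          subst hC
          simp at hlen
          exact absurd hlen.symm h0

theorem independent_set_eq (g : List (List Int)) (k : Int) (h : Pre_independent_set g k) :
    independent_set g k = independent_set_alt g k := by
  obtain ⟨hk0, hsq'⟩ := h
  by_cases hbig : (g.length : Int) < k
  · have hB : independent_set_alt g k = false := by
      unfold independent_set_alt; rw [if_pos hbig]
    have hnil : PySem.List.combinations (PySem.List.pyRange 0 (g.length : Int)) k.toNat = [] := by
      rw [PySem.List.pyRange_zero_natCast]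
      apply PySem.List.combinations_eq_nil_of_length_lt
      simp only [List.length_map, List.length_range]
      omega
    unfold independent_set
    rw [hnil, hB]
    rfl
  · have hk : k ≤ (g.length : Int) := by omega
    have sq := hsq' hk
    have hsq : SqShape g g.length := sqshape_of_rows g g.length rfl sq
    rw [Bool.eq_iff_iff]
    have hBiff : independent_set_alt g k = true ↔
        ∃ C : List Nat, C.Sublist (List.range g.length) ∧ (C.length : Int) = k ∧
          C.Pairwise (fun u v => gEnt g u v = 0) := by
      unfold independent_set_alt
      rw [if_neg hbig, altExtend_iff g g.length (g.length - 0) 0 [] k rfl hk0]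
      constructor
      · rintro ⟨C, hsub, hlen, _, hpair⟩
        exact ⟨C, by simpa [List.range_eq_range'] using hsub, hlen, hpair⟩
      · rintro ⟨C, hsub, hlen, hpair⟩
        exact ⟨C, by simpa [List.range_eq_range'] using hsub, hlen, by simp, hpair⟩
    have hAiff : independent_set g k = true ↔
        ∃ C : List Nat, C.Sublist (List.range g.length) ∧ (C.length : Int) = k ∧
          C.Pairwise (fun u v => gEnt g u v = 0) := by
      unfold independent_set
      rw [PySem.List.pyRange_zero_natCast, PySem.List.combinations_map, List.any_map,
        List.any_eq_true]
      constructor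
      · rintro ⟨CN, hmem, hpred⟩
        obtain ⟨hsub, hlen⟩ := (PySem.List.mem_combinations_iff _ _ _).1 hmem
        simp only [Function.comp_apply, Bool.not_eq_true'] at hpred
        refine ⟨CN, hsub, by rw [hlen]; exact Int.toNat_of_nonneg hk0, ?_⟩
        rw [List.pairwise_iff_forall_sublist]
        intro a b hsubab
        by_contra hne
        have hCp : CN.Pairwise (· < ·) := List.Pairwise.sublist hsub List.pairwise_lt_range
        have hab : a < b := List.pairwise_iff_forall_sublist.1 hCp hsubab
        have hb : b < g.length := List.mem_range.1 (hsub.subset (hsubab.subset (by simp)))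
        have hmc := (maximum_clique_char (pvTmp g (List.map (fun z : Nat => (z : Int)) CN))).2
          ⟨a, b, hab, by rw [pvTmp_length]; exact hb, by
            rw [tmp_entry g g.length hsq sq CN hsub a b hab hb, if_pos ⟨hsubab, hne⟩]⟩
        rw [hpred] at hmc
        cases hmc
      · rintro ⟨CN, hsub, hlen, hpair⟩
        refine ⟨CN, (PySem.List.mem_combinations_iff _ _ _).2 ⟨hsub, by omega⟩, ?_⟩
        simp only [Function.comp_apply, Bool.not_eq_true']
        apply Bool.eq_false_iff.2
        rw [ne_eq, maximum_clique_char]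
        rintro ⟨a, b, hab, hb, hent⟩
        rw [pvTmp_length] at hb
        rw [tmp_entry g g.length hsq sq CN hsub a b hab hb] at hent
        by_cases hcond : [a, b].Sublist CN ∧ gEnt g a b ≠ 0
        · exact hcond.2 (List.pairwise_iff_forall_sublist.1 hpair hcond.1)
        · rw [if_neg hcond] at hent
          exact absurd hent (by norm_num)
    rw [hAiff, hBiff]

-- ===== VERDICT (by name: the statement is the Claim_ definition above) =====
theorem independent_set_spec : Claim_equal_independent_set := by
  intro g k _ hpre
  exact independent_set_eq g k hpre
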